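-- pv_equiv track=rewrite | github.com/REM-Infotech/VueCrawJUD | crawjud/bot/Utils/__init__.py | group_keys
-- ===== SOURCE A (Python) =====
-- def group_keys(
--
--     data: list[dict[str, str]],
-- ) -> dict[str, dict[str, str]]:
--     """Group keys from a list of dictionaries into a consolidated mapping.
--
--     Args:
--         data (list[dict[str, str]]): List of dictionaries with process data.
--
--     Returns:
--         dict[str, dict[str, str]]: A dictionary mapping keys to value dictionaries.
--
--     """
--     record = {}
--     for pos, entry in enumerate(data):
--         for key, value in entry.items():
--             if key not in record:
--                 record[key] = {}
--             record[key][str(pos)] = value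
--     return record
-- ===== SOURCE B (Python) =====
-- def group_keys(
--     data: list[dict[str, str]],
-- ) -> dict[str, dict[str, str]]:
--     """Index-first gather: list the distinct keys once, then collect each
--     key's values with one comprehension pass over the data per key."""
--     seen = dict.fromkeys(key for entry in data for key in entry)
--     return {
--         key: {str(pos): entry[key] for pos, entry in enumerate(data) if key in entry}
--         for key in seen
--     }
-- ===== Notes on version B (the rewrite author's own statement) =====
-- stated objective: alternative
-- what changed: A's single scatter pass that interleaves building the outer and inner dicts is replaced by an index-first gather: collect the distinct keys once (dict.fromkeys), then build the result as a comprehension that rescans data once per key.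
import Mathlib
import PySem

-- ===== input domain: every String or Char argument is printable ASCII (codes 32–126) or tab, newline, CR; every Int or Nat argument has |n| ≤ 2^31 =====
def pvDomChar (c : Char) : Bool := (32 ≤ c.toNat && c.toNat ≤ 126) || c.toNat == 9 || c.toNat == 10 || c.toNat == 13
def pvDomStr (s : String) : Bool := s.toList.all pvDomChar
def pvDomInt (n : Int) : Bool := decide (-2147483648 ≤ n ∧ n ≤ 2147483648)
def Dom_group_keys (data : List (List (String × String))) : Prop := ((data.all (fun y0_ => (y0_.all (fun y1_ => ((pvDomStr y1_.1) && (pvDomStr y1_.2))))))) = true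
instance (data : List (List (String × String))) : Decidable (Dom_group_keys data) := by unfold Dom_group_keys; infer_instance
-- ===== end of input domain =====

-- B replaces A's single interleaved scatter pass by an index-first gather
-- (distinct keys first, then one pass over data per key); objective: alternative.

-- ===== PORT A =====
def group_keys (data : List (List (String × String))) : List (String × List (String × String)) :=
  let record : PySem.Dict String (PySem.Dict String String) :=
    (PySem.List.enumerate data).foldl
      (fun record pe =>
        pe.2.foldl
          (fun record kv =>
            let record :=
              if record.contains kv.1 = false then record.insert kv.1 PySem.Dict.empty else record
            record.modify kv.1 PySem.Dict.empty
              (fun inner => inner.insert (PySem.Int.toStr pe.1) kv.2))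
          record)
      PySem.Dict.empty
  record.items.map (fun p => (p.1, p.2.items))

-- ===== PORT B =====
def group_keys_alt (data : List (List (String × String))) : List (String × List (String × String)) :=
  let seen : List String := PySem.List.dedup (data.flatMap (fun entry => entry.map (·.1)))
  seen.map (fun key =>
    (key,
      ((PySem.List.enumerate data).foldl
        (fun d pe =>
          match (PySem.Dict.mk pe.2).get? key with
          | some v => d.insert (PySem.Int.toStr pe.1) v
          | none => d)
        (PySem.Dict.empty : PySem.Dict String String)).items))

-- ===== PRECONDITION & SPEC =====
-- Pre_ excludes only inner association lists with duplicate keys: those do not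
-- represent any Python dict (dict[str,str] keys are unique), so no Python input is excluded.
def Pre_group_keys (data : List (List (String × String))) : Prop :=
  ∀ entry ∈ data, (entry.map Prod.fst).Nodup
instance (data : List (List (String × String))) : Decidable (Pre_group_keys data) := by
  unfold Pre_group_keys; infer_instance
def pvWitness_group_keys : (List (List (String × String))) :=
  [[("a", "x")], [("a", "y"), ("b", "z")], [], [("b", "q"), ("c", "r")]]
def Spec_group_keys (data : List (List (String × String))) (out : List (String × List (String × String))) : Prop := out = group_keys_alt data
instance (data : List (List (String × String))) (out : List (String × List (String × String))) : Decidable (Spec_group_keys data out) := by unfold Spec_group_keys; infer_instance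

-- ===== CLAIM (what is proved, stated in full; the proofs are below) =====
def Claim_equal_group_keys : Prop := ∀ (data : List (List (String × String))), Dom_group_keys data → Pre_group_keys data → Spec_group_keys data (group_keys data)

-- ===== LEMMAS AND PROOFS =====

-- step of A = plain modify
theorem pv_step_eq (d : PySem.Dict String (PySem.Dict String String)) (k : String)
    (f : PySem.Dict String String → PySem.Dict String String) :
    (if d.contains k = false then d.insert k PySem.Dict.empty else d).modify k PySem.Dict.empty f
      = d.modify k PySem.Dict.empty f := by
  by_cases h : d.contains k = false
  · simp only [h, if_true, PySem.Dict.modify, PySem.Dict.getD_insert_self,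
      PySem.Dict.insert_insert_self]
    rw [PySem.Dict.getD_of_not_contains]
    exact h
  · simp [h]

-- enumerate flatMap ignoring the index
theorem pv_flatMap_enumerate {β : Type} (g : List (String × String) → List β)
    (xs : List (List (String × String))) : ∀ s : Int,
    (PySem.List.enumerate xs s).flatMap (fun pe => g pe.2) = xs.flatMap g := by
  induction xs with
  | nil => intro s; simp [PySem.List.enumerate_nil]
  | cons x xs ih => intro s; simp [PySem.List.enumerate_cons, ih]

-- under unique keys, the matching pairs of an entry are determined by the dict lookup
theorem pv_filter_entry (e : List (String × String)) (k : String)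
    (h : (e.map Prod.fst).Nodup) :
    e.filter (fun kv => kv.1 == k)
      = (match (PySem.Dict.mk e).get? k with
         | some v => [(k, v)]
         | none => []) := by
  induction e with
  | nil => simp [PySem.Dict.get?]
  | cons a e ih =>
    simp only [List.map_cons, List.nodup_cons] at h
    rw [PySem.Dict.get?_mk_cons]
    by_cases hk : a.1 == k
    · have hk' : a.1 = k := by exact (beq_iff_eq).mp hk
      have : e.filter (fun kv => kv.1 == k) = [] := by
        rw [List.filter_eq_nil_iff]
        intro kv hkv hbeq
        exact h.1 (by rw [hk', ← (beq_iff_eq).mp hbeq]; exact List.mem_map_of_mem hkv)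
      simp only [hk, if_true, List.filter_cons, this]
      rw [← hk']
    · simp only [List.filter_cons]
      simp only [hk]
      rw [ih h.2]
      simp

-- lookup after a modify loop = insert loop over the matching triples
theorem pv_getD_fold (l : List (Int × String × String)) (k : String) :
    ∀ d : PySem.Dict String (PySem.Dict String String),
    (l.foldl (fun rec t => rec.modify t.2.1 PySem.Dict.empty
        (fun inner => inner.insert (PySem.Int.toStr t.1) t.2.2)) d).getD k PySem.Dict.empty
      = (l.filter (fun t => t.2.1 == k)).foldl
          (fun inner t => inner.insert (PySem.Int.toStr t.1) t.2.2) (d.getD k PySem.Dict.empty) := by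
  induction l with
  | nil => intro d; simp
  | cons t l ih =>
    intro d
    simp only [List.foldl_cons, List.filter_cons]
    by_cases hk : t.2.1 == k
    · simp only [hk, if_true, List.foldl_cons]
      rw [ih, PySem.Dict.getD_modify]
      rw [if_pos (by exact (beq_iff_eq.mp hk).symm), beq_iff_eq.mp hk]
    · simp only [hk]
      rw [ih, PySem.Dict.getD_modify, if_neg (fun he => by simp [he] at hk)]
      simp

-- the gathered insert loop over matching triples is B's per-key pass
theorem pv_gather (k : String) (data : List (List (String × String)))
    (hp : ∀ entry ∈ data, (entry.map Prod.fst).Nodup) :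
    ∀ (s : Int) (d : PySem.Dict String String),
    (((PySem.List.enumerate data s).flatMap
        (fun pe => pe.2.map (fun kv => (pe.1, kv)))).filter (fun t => t.2.1 == k)).foldl
        (fun inner t => inner.insert (PySem.Int.toStr t.1) t.2.2) d
      = (PySem.List.enumerate data s).foldl
          (fun d pe =>
            match (PySem.Dict.mk pe.2).get? k with
            | some v => d.insert (PySem.Int.toStr pe.1) v
            | none => d) d := by
  induction data with
  | nil => intro s d; simp [PySem.List.enumerate_nil]
  | cons e data ih =>
    intro s d
    simp only [PySem.List.enumerate_cons, List.flatMap_cons, List.filter_append,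
      List.foldl_append, List.foldl_cons]
    rw [ih (fun x hx => hp x (List.mem_cons_of_mem _ hx))]
    congr 1
    have : (e.map (fun kv => ((s : Int), kv))).filter (fun t => t.2.1 == k)
        = (e.filter (fun kv => kv.1 == k)).map (fun kv => ((s : Int), kv)) := by
      rw [List.filter_map]
      rfl
    rw [this, pv_filter_entry e k (hp e (List.mem_cons_self))]
    cases (PySem.Dict.mk e).get? k with
    | some v => simp
    | none => simp

theorem pv_foldl_flatMap {α β γ : Type} (l : List α) (g : α → List β) (f : γ → β → γ) :
    ∀ init, (l.flatMap g).foldl f init = l.foldl (fun acc x => (g x).foldl f acc) init := by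
  induction l with
  | nil => intro init; simp
  | cons x l ih => intro init; simp [ih]

theorem pv_main (data : List (List (String × String)))
    (hp : ∀ entry ∈ data, (entry.map Prod.fst).Nodup) :
    group_keys data = group_keys_alt data := by
  unfold group_keys group_keys_alt
  have hstep : ∀ (record : PySem.Dict String (PySem.Dict String String))
      (pe : Int × List (String × String)),
      pe.2.foldl (fun record kv =>
        let record := if record.contains kv.1 = false then record.insert kv.1 PySem.Dict.empty
          else record
        record.modify kv.1 PySem.Dict.empty
          (fun inner => inner.insert (PySem.Int.toStr pe.1) kv.2)) record
      = pe.2.foldl (fun record kv => record.modify kv.1 PySem.Dict.empty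
          (fun inner => inner.insert (PySem.Int.toStr pe.1) kv.2)) record := by
    intro record pe
    congr 1
    funext rec kv
    exact pv_step_eq rec kv.1 _
  simp only [hstep]
  rw [show (PySem.List.enumerate data 0).foldl
      (fun record pe => pe.2.foldl (fun record kv => record.modify kv.1 PySem.Dict.empty
        (fun inner => inner.insert (PySem.Int.toStr pe.1) kv.2)) record) PySem.Dict.empty
    = ((PySem.List.enumerate data 0).flatMap
        (fun pe => pe.2.map (fun kv => (pe.1, kv)))).foldl
        (fun rec t => rec.modify t.2.1 PySem.Dict.empty
          (fun inner => inner.insert (PySem.Int.toStr t.1) t.2.2)) PySem.Dict.empty from by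
    rw [pv_foldl_flatMap]
    simp only [List.foldl_map]]
  have hnd : (((PySem.List.enumerate data 0).flatMap
        (fun pe => pe.2.map (fun kv => (pe.1, kv)))).foldl
        (fun rec t => rec.modify t.2.1 PySem.Dict.empty
          (fun inner => inner.insert (PySem.Int.toStr t.1) t.2.2)) PySem.Dict.empty).keys.Nodup :=
    PySem.Dict.nodup_keys_foldl_modify_key _
      (fun (t : Int × String × String) => t.2.1) _
      (fun _ (t : Int × String × String) =>
        (fun (inner : PySem.Dict String String) =>
          inner.insert (PySem.Int.toStr t.1) t.2.2)) _
      PySem.Dict.nodup_keys_empty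
  rw [PySem.Dict.items_eq_map_keys _ hnd PySem.Dict.empty, List.map_map]
  have hkeys : (((PySem.List.enumerate data 0).flatMap
        (fun pe => pe.2.map (fun kv => (pe.1, kv)))).foldl
        (fun rec t => rec.modify t.2.1 PySem.Dict.empty
          (fun inner => inner.insert (PySem.Int.toStr t.1) t.2.2)) PySem.Dict.empty).keys
      = PySem.Set.ofList (data.flatMap (fun entry => entry.map (·.1))) := by
    rw [PySem.Dict.keys_foldl_modify_key
      ((PySem.List.enumerate data 0).flatMap (fun pe => pe.2.map (fun kv => (pe.1, kv))))
      (fun t => t.2.1) PySem.Dict.empty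
      (fun _ t => (fun inner => inner.insert (PySem.Int.toStr t.1) t.2.2))]
    rw [List.map_flatMap]
    simp only [Function.comp_def, List.map_map]
    rw [pv_flatMap_enumerate (fun e => e.map (fun kv => kv.1)) data 0]
    rfl
  rw [hkeys, PySem.List.dedup_eq_ofList]
  apply List.map_congr_left
  intro k _
  simp only [Function.comp_apply]
  rw [pv_getD_fold, PySem.Dict.getD_empty, pv_gather k data hp 0 PySem.Dict.empty]

-- ===== VERDICT (by name: the statement is the Claim_ definition above) =====
theorem group_keys_spec : Claim_equal_group_keys := by
  intro data _ hp
  unfold Spec_group_keys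
  exact pv_main data hp
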